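-- pv_equiv track=rewrite | github.com/finlaymcnally/RecipeImporter | cookimport/plugins/text.py | _split_by_positions
-- ===== SOURCE A (Python) =====
-- from bisect import bisect_right
-- from typing import TYPE_CHECKING, Any, Callable, Dict, List, Optional, Tuple
--
-- def _line_start_offsets(text: str) -> list[int]:
--     starts = [0]
--     for index, char in enumerate(text):
--         if char == "\n":
--             starts.append(index + 1)
--     return starts
--
-- def _trimmed_char_range(
--     text: str,
--     *,
--     start_char: int,
--     end_char: int,
-- ) -> tuple[int, int] | None:
--     start = max(0, min(len(text), int(start_char)))
--     end = max(start, min(len(text), int(end_char)))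
--     while start < end and text[start].isspace():
--         start += 1
--     while end > start and text[end - 1].isspace():
--         end -= 1
--     if start >= end:
--         return None
--     return start, end
--
-- def _line_number_for_char_offset(line_starts: list[int], offset: int) -> int:
--     return bisect_right(line_starts, offset) - 1
--
-- def _chunk_from_char_range(
--     text: str,
--     *,
--     start_char: int,
--     end_char: int,
--     line_starts: list[int],
-- ) -> tuple[str, tuple[int, int]] | None:
--     trimmed_range = _trimmed_char_range(
--         text,
--         start_char=start_char,
--         end_char=end_char,
--     )
--     if trimmed_range is None:
--         return None
--     trimmed_start, trimmed_end = trimmed_range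
--     chunk = text[trimmed_start:trimmed_end]
--     start_line = _line_number_for_char_offset(line_starts, trimmed_start) + 1
--     end_line = _line_number_for_char_offset(line_starts, trimmed_end - 1) + 1
--     return chunk, (start_line, end_line)
--
-- def _split_by_positions(text: str, positions: List[int]) -> List[Tuple[str, Tuple[int, int]]]:
--     chunks = []
--     line_starts = _line_start_offsets(text)
--     cleaned_positions = sorted(
--         {
--             max(0, min(len(text), int(position)))
--             for position in positions
--         }
--     )
--     for i in range(len(cleaned_positions)):
--         start = cleaned_positions[i]
--         end = cleaned_positions[i + 1] if i + 1 < len(cleaned_positions) else len(text)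
--         chunk = _chunk_from_char_range(
--             text,
--             start_char=start,
--             end_char=end,
--             line_starts=line_starts,
--         )
--         if chunk is not None:
--             chunks.append(chunk)
--     return chunks
-- ===== SOURCE B (Python) =====
-- from typing import List, Tuple
--
-- def _split_by_positions(text: str, positions: List[int]) -> List[Tuple[str, Tuple[int, int]]]:
--     n = len(text)
--     cleaned = sorted({max(0, min(n, int(p))) for p in positions})
--     bounds = cleaned + [n]
--     chunks = []
--     off = 0
--     cnt = 0  # newlines in text[:off]; offsets are queried in non-decreasing order
--     for start, end in zip(bounds, bounds[1:]):
--         s, e = start, end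
--         while s < e and text[s].isspace():
--             s += 1
--         while e > s and text[e - 1].isspace():
--             e -= 1
--         if s < e:
--             cnt += text.count("\n", off, s)
--             off = s
--             start_line = cnt + 1
--             cnt += text.count("\n", off, e - 1)
--             off = e - 1
--             end_line = cnt + 1
--             chunks.append((text[s:e], (start_line, end_line)))
--     return chunks
-- ===== Notes on version B (the rewrite author's own statement) =====
-- stated objective: simpler
-- what changed: B inlines A's four helpers into one loop, pairs chunk boundaries by zipping adjacent bounds instead of indexing with range(len), and replaces the line_starts table + bisect_right with a forward cursor that counts newlines over disjoint slices (text.count) as offsets only ever grow.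
import Mathlib
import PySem

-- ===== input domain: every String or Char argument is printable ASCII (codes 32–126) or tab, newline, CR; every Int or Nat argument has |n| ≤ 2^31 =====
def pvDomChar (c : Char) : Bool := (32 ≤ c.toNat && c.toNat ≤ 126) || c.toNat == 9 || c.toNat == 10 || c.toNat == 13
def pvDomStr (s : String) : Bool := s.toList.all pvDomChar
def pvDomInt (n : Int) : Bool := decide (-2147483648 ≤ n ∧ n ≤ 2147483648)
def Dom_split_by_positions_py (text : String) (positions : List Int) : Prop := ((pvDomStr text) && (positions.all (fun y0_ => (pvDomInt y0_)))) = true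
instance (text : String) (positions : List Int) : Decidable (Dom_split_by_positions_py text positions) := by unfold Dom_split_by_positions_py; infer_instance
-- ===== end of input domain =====

-- B inlines A's helpers, pairs chunk boundaries by zipping adjacent bounds, and replaces the
-- line_starts table + bisect_right with direct newline counts over the prefix (objective: simpler).

-- ===== PORT A =====
-- _line_start_offsets
def pvA_lineStartOffsets (text : String) : List Int :=
  (PySem.List.enumerate text.toList).foldl
    (fun starts ic => if ic.2 = '\n' then starts ++ [ic.1 + 1] else starts) [0]

-- 'while start < end and text[start].isspace(): start += 1' (the index is always in range there: start < end ≤ len)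
def pvA_trimStart (cs : List Char) (e s : Int) : Int :=
  if h : s < e ∧ PySem.Chars.isspace (PySem.List.pyGetD cs s 'x') then pvA_trimStart cs e (s + 1) else s
termination_by (e - s).toNat
decreasing_by omega

-- 'while end > start and text[end - 1].isspace(): end -= 1'
def pvA_trimEnd (cs : List Char) (s e : Int) : Int :=
  if h : s < e ∧ PySem.Chars.isspace (PySem.List.pyGetD cs (e - 1) 'x') then pvA_trimEnd cs s (e - 1) else e
termination_by (e - s).toNat
decreasing_by omega

-- _trimmed_char_range
def pvA_trimmedRange (cs : List Char) (startChar endChar : Int) : Option (Int × Int) :=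
  let start0 := max 0 (min (cs.length : Int) startChar)
  let end0 := max start0 (min (cs.length : Int) endChar)
  let start := pvA_trimStart cs end0 start0
  let stop := pvA_trimEnd cs start end0
  if start ≥ stop then none else some (start, stop)

-- _line_number_for_char_offset (bisect_right is PySem.List.bisectRight; line_starts is sorted)
def pvA_lineNumber (lineStarts : List Int) (offset : Int) : Int :=
  (PySem.List.bisectRight lineStarts offset : Int) - 1

-- _chunk_from_char_range
def pvA_chunkFromRange (cs : List Char) (startChar endChar : Int) (lineStarts : List Int) :
    Option (String × (Int × Int)) :=
  match pvA_trimmedRange cs startChar endChar with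
  | none => none
  | some (ts, te) =>
      some (String.ofList (PySem.List.slice cs (some ts) (some te)),
            (pvA_lineNumber lineStarts ts + 1, pvA_lineNumber lineStarts (te - 1) + 1))

def split_by_positions_py (text : String) (positions : List Int) : List (String × (Int × Int)) :=
  let cs := text.toList
  let lineStarts := pvA_lineStartOffsets text
  let cleaned := PySem.List.sorted
    (PySem.Set.ofList (positions.map (fun p => max 0 (min (cs.length : Int) p)))) (fun x => x)
  (PySem.List.pyRange 0 (cleaned.length : Int) 1).foldl
    (fun chunks i =>
      match pvA_chunkFromRange cs (PySem.List.pyGetD cleaned i 0)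
          (if i + 1 < (cleaned.length : Int) then PySem.List.pyGetD cleaned (i + 1) 0
           else (cs.length : Int)) lineStarts with
      | some c => chunks ++ [c]
      | none => chunks) []

-- ===== PORT B =====
-- 'while s < e and text[s].isspace(): s += 1'
def pvB_trimL (cs : List Char) (e s : Int) : Int :=
  if h : s < e ∧ PySem.Chars.isspace (PySem.List.pyGetD cs s 'x') then pvB_trimL cs e (s + 1) else s
termination_by (e - s).toNat
decreasing_by omega

-- 'while e > s and text[e - 1].isspace(): e -= 1'
def pvB_trimR (cs : List Char) (s e : Int) : Int :=
  if h : s < e ∧ PySem.Chars.isspace (PySem.List.pyGetD cs (e - 1) 'x') then pvB_trimR cs s (e - 1) else e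
termination_by (e - s).toNat
decreasing_by omega

-- text.count("\n", off, k) is the newline count over the slice text[off:k]
def split_by_positions_py_alt (text : String) (positions : List Int) : List (String × (Int × Int)) :=
  let cs := text.toList
  let n : Int := (cs.length : Int)
  let cleaned := PySem.List.sorted
    (PySem.Set.ofList (positions.map (fun p => max 0 (min n p)))) (fun x => x)
  let bounds := cleaned ++ [n]
  ((bounds.zip bounds.tail).foldl
    (fun st se =>
      let s := pvB_trimL cs se.2 se.1
      let e := pvB_trimR cs s se.2
      if s < e then
        let c1 := st.2.2 + (PySem.Chars.count (PySem.List.slice cs (some st.2.1) (some s)) ['\n'] : Int)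
        let c2 := c1 + (PySem.Chars.count (PySem.List.slice cs (some s) (some (e - 1))) ['\n'] : Int)
        (st.1 ++ [(String.ofList (PySem.List.slice cs (some s) (some e)), (c1 + 1, c2 + 1))], e - 1, c2)
      else st)
    ([], 0, 0)).1

-- ===== PRECONDITION & SPEC =====
def Spec_split_by_positions_py (text : String) (positions : List Int) (out : List (String × (Int × Int))) : Prop := out = split_by_positions_py_alt text positions
instance (text : String) (positions : List Int) (out : List (String × (Int × Int))) : Decidable (Spec_split_by_positions_py text positions out) := by unfold Spec_split_by_positions_py; infer_instance

-- ===== CLAIM (what is proved, stated in full; the proofs are below) =====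
def Claim_equal_split_by_positions_py : Prop := ∀ (text : String) (positions : List Int), Dom_split_by_positions_py text positions → Spec_split_by_positions_py text positions (split_by_positions_py text positions)

-- ===== LEMMAS AND PROOFS =====

-- B's while-loops are the same loops as A's helper loops
theorem trimL_eq (cs : List Char) (e s : Int) : pvB_trimL cs e s = pvA_trimStart cs e s := by
  induction s using pvA_trimStart.induct (cs := cs) (e := e) with
  | case1 s h ih => rw [pvB_trimL, pvA_trimStart]; simp only [h, and_self, dite_true]; exact ih
  | case2 s h => rw [pvB_trimL, pvA_trimStart]; simp [h]

theorem trimR_eq (cs : List Char) (s e : Int) : pvB_trimR cs s e = pvA_trimEnd cs s e := by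
  induction e using pvA_trimEnd.induct (cs := cs) (s := s) with
  | case1 e h ih => rw [pvB_trimR, pvA_trimEnd]; simp only [h, and_self, dite_true]; exact ih
  | case2 e h => rw [pvB_trimR, pvA_trimEnd]; simp [h]

theorem trimStart_bounds (cs : List Char) (e s : Int) (h : s ≤ e) :
    s ≤ pvA_trimStart cs e s ∧ pvA_trimStart cs e s ≤ e := by
  revert h
  induction s using pvA_trimStart.induct (cs := cs) (e := e) with
  | case1 s h1 ih =>
    intro h
    rw [pvA_trimStart]; simp only [h1, and_self, dite_true]
    have := ih (by omega); omega
  | case2 s h1 => intro h; rw [pvA_trimStart]; simp only [h1, dite_false]; omega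

theorem trimEnd_bounds (cs : List Char) (s e : Int) (h : s ≤ e) :
    s ≤ pvA_trimEnd cs s e ∧ pvA_trimEnd cs s e ≤ e := by
  revert h
  induction e using pvA_trimEnd.induct (cs := cs) (s := s) with
  | case1 e h1 ih =>
    intro h
    rw [pvA_trimEnd]; simp only [h1, and_self, dite_true]
    have := ih (by omega); omega
  | case2 e h1 => intro h; rw [pvA_trimEnd]; simp only [h1, dite_false]; omega

-- line_starts = 0 :: (successors of the newline offsets)
def pvNl (cs : List Char) : List Int :=
  ((PySem.List.enumerate cs).filter (fun p => decide (p.2 = '\n'))).map (fun p => p.1 + 1)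

theorem lineStarts_eq (text : String) :
    pvA_lineStartOffsets text = 0 :: pvNl text.toList := by
  unfold pvA_lineStartOffsets pvNl
  rw [PySem.List.foldl_append_ite (p := fun ic : Int × Char => ic.2 = '\n')
    (f := fun ic : Int × Char => ic.1 + 1)]
  simp

theorem pvNl_pairwise (cs : List Char) : (pvNl cs).Pairwise (· < ·) := by
  unfold pvNl
  have h1 : ((PySem.List.enumerate cs).filter (fun p => decide (p.2 = '\n'))).Pairwise
      (fun p q : Int × Char => p.1 < q.1) :=
    (PySem.List.pairwise_lt_enumerate cs 0).filter _
  exact List.Pairwise.map _ (fun a b hab => by omega) h1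

theorem pvNl_pos (cs : List Char) : ∀ x ∈ pvNl cs, 0 < x := by
  intro x hx
  unfold pvNl at hx
  obtain ⟨p, hp, rfl⟩ := List.mem_map.mp hx
  have := List.mem_filter.mp hp
  obtain ⟨k, hk, rfl⟩ := (PySem.List.mem_enumerate_iff _ _ _).mp this.1
  omega

theorem enum_countP (cs : List Char) : ∀ (s o : Int),
    ((PySem.List.enumerate cs s).filter (fun p => decide (p.2 = '\n'))).countP
        (fun p => decide (p.1 < o))
      = (cs.take (o - s).toNat).count '\n' := by
  induction cs with
  | nil => intro s o; simp [PySem.List.enumerate]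
  | cons c t ih =>
    intro s o
    rw [PySem.List.enumerate_cons]
    by_cases h1 : 1 ≤ o - s
    · have h2 : (o - s).toNat = (o - (s+1)).toNat + 1 := by omega
      rw [h2, List.take_succ_cons, List.count_cons]
      by_cases hc : c = '\n'
      · subst hc
        have ho : s < o := by omega
        simp [List.countP_cons, ho, ih (s+1) o]
      · simp [hc, ih (s+1) o]
    · have h2 : (o - s).toNat = 0 := by omega
      have h3 : (o - (s+1)).toNat = 0 := by omega
      have ho : ¬ (s < o) := by omega
      rw [h2]
      by_cases hc : c = '\n'
      · subst hc
        simp [List.countP_cons, ho, ih (s+1) o, h3]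
      · simp [hc, ih (s+1) o, h3]

-- a strictly increasing list: the j-th element is ≤ o exactly when j is below the count of elements ≤ o
theorem pairwise_lt_getElem_le_iff (l : List Int) (hl : l.Pairwise (· < ·)) (o : Int) :
    ∀ (j : Nat) (hj : j < l.length), (l[j] ≤ o ↔ j < l.countP (fun x => decide (x ≤ o))) := by
  induction l with
  | nil => intro j hj; simp at hj
  | cons x t ih =>
    intro j hj
    rw [List.countP_cons]
    rcases j with _ | j
    · simp only [List.getElem_cons_zero]
      constructor
      · intro hx; simp [hx]
      · intro hc
        by_contra hx
        have ht : t.countP (fun y => decide (y ≤ o)) = 0 := by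
          rw [List.countP_eq_zero]
          intro y hy
          have := (List.pairwise_cons.mp hl).1 y hy
          simp; omega
        simp [hx, ht] at hc
    · simp only [List.getElem_cons_succ]
      rw [ih (List.pairwise_cons.mp hl).2 j (by simpa using hj)]
      by_cases hx : x ≤ o
      · simp [hx]
      · have ht : t.countP (fun y => decide (y ≤ o)) = 0 := by
          rw [List.countP_eq_zero]
          intro y hy
          have := (List.pairwise_cons.mp hl).1 y hy
          simp; omega
        simp [hx, ht]

-- bisect_right is determined by its spec on a sorted list
theorem bisectRight_eq (ls : List Int) (hs : ls.Pairwise (· ≤ ·)) (o : Int) (r : Nat)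
    (hr : r ≤ ls.length)
    (h1 : ∀ j (hj : j < ls.length), j < r → ls[j] ≤ o)
    (h2 : ∀ j (hj : j < ls.length), r ≤ j → o < ls[j]) :
    PySem.List.bisectRight ls o = r := by
  obtain ⟨hb, hble, hbgt⟩ := PySem.List.bisectRight_spec ls o hs
  set b := PySem.List.bisectRight ls o with hbdef
  rcases Nat.lt_trichotomy b r with h | h | h
  · have hblen : b < ls.length := by omega
    have := hbgt b hblen (le_refl _)
    have := h1 b hblen h
    omega
  · exact h
  · have hrlen : r < ls.length := by omega
    have := hble r hrlen h
    have := h2 r hrlen (le_refl _)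
    omega

-- A's line number at a nonnegative offset is the newline count before that offset
theorem bisect_line (text : String) (o : Int) (ho : 0 ≤ o) :
    pvA_lineNumber (pvA_lineStartOffsets text) o
      = ((text.toList.take o.toNat).count '\n' : Int) := by
  rw [pvA_lineNumber, lineStarts_eq]
  have hlt : (0 :: pvNl text.toList).Pairwise (· < ·) :=
    List.pairwise_cons.mpr ⟨pvNl_pos text.toList, pvNl_pairwise text.toList⟩
  have hle : (0 :: pvNl text.toList).Pairwise (· ≤ ·) := hlt.imp le_of_lt
  have hnl : (pvNl text.toList).countP (fun x => decide (x ≤ o))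
      = (text.toList.take o.toNat).count '\n' := by
    unfold pvNl
    rw [List.countP_map]
    rw [List.countP_congr (q := fun p : Int × Char => decide (p.1 < o)) (fun a _ => by
      simp [Int.add_one_le_iff])]
    have := enum_countP text.toList 0 o
    simpa using this
  have hcount : (0 :: pvNl text.toList).countP (fun x => decide (x ≤ o))
      = (text.toList.take o.toNat).count '\n' + 1 := by
    rw [List.countP_cons, hnl]
    simp [ho]
  rw [bisectRight_eq (0 :: pvNl text.toList) hle o
    ((text.toList.take o.toNat).count '\n' + 1)
    (by rw [← hcount]; exact List.countP_le_length)
    (fun j hj hjr => (pairwise_lt_getElem_le_iff _ hlt o j hj).mpr (by omega))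
    (fun j hj hjr => by
      have := (pairwise_lt_getElem_le_iff _ hlt o j hj)
      by_contra hno
      have : j < (0 :: pvNl text.toList).countP (fun x => decide (x ≤ o)) := this.mp (by omega)
      omega)]
  push_cast
  ring

-- str.count with a single-character needle is List.count
theorem count_go_singleton (c : Char) :
    ∀ (l : List Char) (fuel acc : Nat), l.length ≤ fuel →
      PySem.Chars.count.go [c] fuel l acc = acc + l.count c := by
  intro l
  induction l with
  | nil => intro fuel acc h; cases fuel <;> simp [PySem.Chars.count.go]
  | cons h t ih =>
    intro fuel acc hf
    cases fuel with
    | zero => simp at hf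
    | succ f =>
      rw [PySem.Chars.count.go]
      by_cases hc : c = h
      · subst hc
        have hpre : [c].isPrefixOf (c :: t) = true := by simp [List.isPrefixOf]
        simp only [hpre, if_true, List.length_cons, List.drop_succ_cons, List.length_nil,
          List.drop_zero]
        rw [ih f (acc + 1) (by simpa using hf)]
        simp [List.count_cons]
        omega
      · have hpre : [c].isPrefixOf (h :: t) = false := by
          simp [List.isPrefixOf]; exact fun hh => hc (hh ▸ rfl)
        simp only [hpre, if_false]
        rw [ih f acc (by simp at hf; omega)]
        simp [List.count_cons, hc]
        intro hh; exact absurd hh.symm hc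

theorem chars_count_singleton (l : List Char) (c : Char) :
    PySem.Chars.count l [c] = l.count c := by
  rw [PySem.Chars.count]
  simp only [List.isEmpty, if_false]
  rw [count_go_singleton c l l.length 0 (le_refl _)]
  simp

-- the index loop over cleaned_positions visits exactly the adjacent pairs of bounds
theorem foldl_range_pairs {β : Type} (g : β → Int → Int → β) (m : Int) :
    ∀ (l : List Int) (init : β),
      (List.range l.length).foldl
          (fun acc k => g acc (l.getD k 0)
            (if k + 1 < l.length then l.getD (k + 1) 0 else m)) init
        = ((l ++ [m]).zip ((l ++ [m]).tail)).foldl (fun acc p => g acc p.1 p.2) init := by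
  intro l
  induction l with
  | nil => intro init; simp
  | cons x t ih =>
    intro init
    rw [List.length_cons, List.range_succ_eq_map, List.foldl_cons, List.foldl_map]
    rw [PySem.List.foldl_congr_mem (List.range t.length) _
      (fun acc k => g acc (t.getD k 0) (if k + 1 < t.length then t.getD (k + 1) 0 else m)) _
      (by
        intro acc k _
        simp only [List.getD_cons_succ]
        congr 1
        by_cases hk : k + 1 < t.length
        · simp [hk]
        · simp [hk])]
    rw [ih]
    cases t with
    | nil => simp
    | cons y u =>
      simp only [List.getD_cons_zero, List.getD_cons_succ, List.cons_append,
        List.tail_cons, List.zip_cons_cons, List.foldl_cons]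
      congr 1

theorem foldl_index_pairs {β : Type} (g : β → Int → Int → β) (m : Int) (l : List Int) (init : β) :
      (PySem.List.pyRange 0 (l.length : Int) 1).foldl
          (fun acc i => g acc (PySem.List.pyGetD l i 0)
            (if i + 1 < (l.length : Int) then PySem.List.pyGetD l (i + 1) 0 else m)) init
        = ((l ++ [m]).zip ((l ++ [m]).tail)).foldl (fun acc p => g acc p.1 p.2) init := by
  rw [PySem.List.pyRange_zero_nat, List.foldl_map]
  rw [PySem.List.foldl_congr_mem (List.range l.length) _
    (fun acc k => g acc (l.getD k 0) (if k + 1 < l.length then l.getD (k + 1) 0 else m)) _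
    (by
      intro acc k _
      have h2 : ((k : Int) + 1) = (((k + 1 : Nat)) : Int) := by push_cast; ring
      rw [PySem.List.pyGetD_natCast, h2, PySem.List.pyGetD_natCast]
      congr 1
      by_cases hk : k + 1 < l.length
      · simp [hk]
        intro h
        exact absurd h (by omega)
      · simp [hk]
        intro h
        exact absurd h (by omega))]
  exact foldl_range_pairs g m l init

-- proof-only loop-body abbreviations for the two ports
def pvBodyA (text : String) (acc : List (String × (Int × Int))) (p : Int × Int) :
    List (String × (Int × Int)) :=
  match pvA_chunkFromRange text.toList p.1 p.2 (pvA_lineStartOffsets text) with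
  | some c => acc ++ [c]
  | none => acc

def pvBodyB (text : String) (st : List (String × (Int × Int)) × Int × Int) (se : Int × Int) :
    List (String × (Int × Int)) × Int × Int :=
  let cs := text.toList
  let s := pvB_trimL cs se.2 se.1
  let e := pvB_trimR cs s se.2
  if s < e then
    let c1 := st.2.2 + (PySem.Chars.count (PySem.List.slice cs (some st.2.1) (some s)) ['\n'] : Int)
    let c2 := c1 + (PySem.Chars.count (PySem.List.slice cs (some s) (some (e - 1))) ['\n'] : Int)
    (st.1 ++ [(String.ofList (PySem.List.slice cs (some s) (some e)), (c1 + 1, c2 + 1))], e - 1, c2)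
  else st

-- newline counts over adjacent slices add up to the prefix count
theorem count_slice_add (text : String) (off k : Int) (h0 : 0 ≤ off) (hk : off ≤ k) :
    ((text.toList.take k.toNat).count '\n' : Int)
      = ((text.toList.take off.toNat).count '\n' : Int)
        + (PySem.Chars.count (PySem.List.slice text.toList (some off) (some k)) ['\n'] : Int) := by
  rw [PySem.List.slice_toNat _ h0 (by omega), chars_count_singleton]
  have hsplit : text.toList.take k.toNat
      = text.toList.take off.toNat ++ (text.toList.drop off.toNat).take (k.toNat - off.toNat) := by
    rw [← List.take_add]
    congr 1
    omega
  rw [hsplit, List.count_append]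
  push_cast
  ring

-- A's per-pair loop body, written with B's trims and explicit prefix newline counts
theorem chunkA_explicit (text : String) (a b : Int)
    (ha : 0 ≤ a) (hab : a ≤ b) (hb : b ≤ (text.toList.length : Int))
    (acc : List (String × (Int × Int))) :
    pvBodyA text acc (a, b)
    = (if pvB_trimL text.toList b a < pvB_trimR text.toList (pvB_trimL text.toList b a) b then
        acc ++ [(String.ofList (PySem.List.slice text.toList (some (pvB_trimL text.toList b a))
            (some (pvB_trimR text.toList (pvB_trimL text.toList b a) b))),
          (((text.toList.take (pvB_trimL text.toList b a).toNat).count '\n' : Int) + 1,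
           ((text.toList.take (pvB_trimR text.toList (pvB_trimL text.toList b a) b - 1).toNat).count '\n' : Int) + 1))]
      else acc) := by
  have hstart0 : max 0 (min (text.toList.length : Int) a) = a := by omega
  have hend0 : max a (min (text.toList.length : Int) b) = b := by omega
  have hts := trimStart_bounds text.toList b a hab
  have hte := trimEnd_bounds text.toList (pvA_trimStart text.toList b a) b hts.2
  rw [trimL_eq, trimR_eq]
  rw [pvBodyA, pvA_chunkFromRange, pvA_trimmedRange]
  simp only [hstart0, hend0]
  by_cases hlt : pvA_trimStart text.toList b a
      < pvA_trimEnd text.toList (pvA_trimStart text.toList b a) b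
  · rw [if_neg (by omega), if_pos hlt]
    dsimp only
    have h0ts : 0 ≤ pvA_trimStart text.toList b a := by omega
    have h0te : 0 ≤ pvA_trimEnd text.toList (pvA_trimStart text.toList b a) b - 1 := by omega
    rw [bisect_line text _ h0ts, bisect_line text _ h0te]
  · rw [if_pos (by omega), if_neg hlt]

-- the two loops agree: B carries (offset, running newline count) through the fold
theorem foldB_eq_foldA (text : String) :
    ∀ (bnds : List Int) (acc : List (String × (Int × Int))) (off cnt : Int),
      (∀ x ∈ bnds, 0 ≤ x ∧ x ≤ (text.toList.length : Int)) →
      bnds.Pairwise (· ≤ ·) →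
      0 ≤ off →
      (∀ x ∈ bnds, off ≤ x) →
      cnt = ((text.toList.take off.toNat).count '\n' : Int) →
      ((bnds.zip bnds.tail).foldl (pvBodyB text) (acc, off, cnt)).1
        = (bnds.zip bnds.tail).foldl (pvBodyA text) acc := by
  intro bnds
  induction bnds with
  | nil => intros; simp
  | cons x t ih =>
    intro acc off cnt hmem hpw hoff hofle hcnt
    cases t with
    | nil => simp
    | cons y rest =>
      rw [List.tail_cons, List.zip_cons_cons, List.foldl_cons, List.foldl_cons]
      have hx := hmem x (by simp)
      have hy := hmem y (by simp)
      have hxy : x ≤ y := (List.pairwise_cons.mp hpw).1 y (by simp)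
      have htsA := trimStart_bounds text.toList y x hxy
      have hteA := trimEnd_bounds text.toList (pvA_trimStart text.toList y x) y htsA.2
      have htsL : pvB_trimL text.toList y x = pvA_trimStart text.toList y x := trimL_eq _ _ _
      have hteR : pvB_trimR text.toList (pvB_trimL text.toList y x) y
          = pvA_trimEnd text.toList (pvA_trimStart text.toList y x) y := by
        rw [htsL, trimR_eq]
      rw [chunkA_explicit text x y hx.1 hxy hy.2 acc]
      simp only [pvBodyB]
      by_cases hlt : pvB_trimL text.toList y x
          < pvB_trimR text.toList (pvB_trimL text.toList y x) y
      · rw [if_pos hlt, if_pos hlt]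
        have hoffx : off ≤ x := hofle x (by simp)
        have e1 : cnt + (PySem.Chars.count (PySem.List.slice text.toList (some off)
              (some (pvB_trimL text.toList y x))) ['\n'] : Int)
            = ((text.toList.take (pvB_trimL text.toList y x).toNat).count '\n' : Int) := by
          have := count_slice_add text off (pvB_trimL text.toList y x) hoff (by omega)
          omega
        have e2 : ((text.toList.take (pvB_trimL text.toList y x).toNat).count '\n' : Int)
              + (PySem.Chars.count (PySem.List.slice text.toList (some (pvB_trimL text.toList y x))
                  (some (pvB_trimR text.toList (pvB_trimL text.toList y x) y - 1))) ['\n'] : Int)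
            = ((text.toList.take (pvB_trimR text.toList (pvB_trimL text.toList y x) y - 1).toNat).count '\n' : Int) := by
          have := count_slice_add text (pvB_trimL text.toList y x)
            (pvB_trimR text.toList (pvB_trimL text.toList y x) y - 1) (by omega) (by omega)
          omega
        rw [e1, e2]
        exact ih _ _ _
          (fun z hz => hmem z (List.mem_cons_of_mem _ hz))
          (List.pairwise_cons.mp hpw).2
          (by omega)
          (fun z hz => by
            rcases List.mem_cons.mp hz with rfl | hz2
            · omega
            · have := (List.pairwise_cons.mp (List.pairwise_cons.mp hpw).2).1 z hz2
              omega)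
          rfl
      · rw [if_neg hlt, if_neg hlt]
        exact ih _ _ _
          (fun z hz => hmem z (List.mem_cons_of_mem _ hz))
          (List.pairwise_cons.mp hpw).2
          hoff
          (fun z hz => hofle z (List.mem_cons_of_mem _ hz))
          hcnt

-- B's bounds list: ordered, inside [0, len(text)]
theorem bounds_mem (text : String) (positions : List Int) :
    ∀ x ∈ (PySem.List.sorted
        (PySem.Set.ofList (positions.map (fun q => max 0 (min (text.toList.length : Int) q)))) (fun x => x)
        ++ [(text.toList.length : Int)]),
      0 ≤ x ∧ x ≤ (text.toList.length : Int) := by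
  intro x hx
  rw [List.mem_append] at hx
  rcases hx with hx | hx
  · rw [PySem.List.mem_sorted, PySem.Set.mem_ofList, List.mem_map] at hx
    obtain ⟨q, _, rfl⟩ := hx
    constructor <;> [omega; omega]
  · simp at hx
    subst hx
    exact ⟨by positivity, le_refl _⟩

theorem bounds_pw (text : String) (positions : List Int) :
    ((PySem.List.sorted
        (PySem.Set.ofList (positions.map (fun q => max 0 (min (text.toList.length : Int) q)))) (fun x => x)
        ++ [(text.toList.length : Int)])).Pairwise (· ≤ ·) := by
  rw [List.pairwise_append]
  refine ⟨(PySem.List.sorted_ofList_pairwise_lt _).imp le_of_lt, by simp, ?_⟩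
  intro x hx y hy
  simp at hy
  subst hy
  exact (bounds_mem text positions x (List.mem_append_left _ hx)).2

-- ===== VERDICT (by name: the statement is the Claim_ definition above) =====
theorem split_by_positions_py_spec : Claim_equal_split_by_positions_py := by
  intro text positions _
  show split_by_positions_py text positions = split_by_positions_py_alt text positions
  set cs := text.toList with hcs
  set cleaned := PySem.List.sorted
    (PySem.Set.ofList (positions.map (fun p => max 0 (min (cs.length : Int) p)))) (fun x => x)
    with hcl
  set bounds := cleaned ++ [(cs.length : Int)] with hbd
  have hA : split_by_positions_py text positions
      = (bounds.zip bounds.tail).foldl (pvBodyA text) [] := by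
    exact foldl_index_pairs
      (fun acc a b =>
        (match pvA_chunkFromRange cs a b (pvA_lineStartOffsets text) with
        | some c => acc ++ [c]
        | none => acc))
      (cs.length : Int) cleaned []
  have hB : split_by_positions_py_alt text positions
      = ((bounds.zip bounds.tail).foldl (pvBodyB text) ([], 0, 0)).1 := rfl
  rw [hA, hB]
  refine (foldB_eq_foldA text bounds [] 0 0 ?_ ?_ (le_refl 0) ?_ ?_).symm
  · rw [hbd, hcl, hcs]; exact bounds_mem text positions
  · rw [hbd, hcl, hcs]; exact bounds_pw text positions
  · intro z hz
    exact (by rw [hbd, hcl, hcs] at hz; exact (bounds_mem text positions z hz).1)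
  · simp
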